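-- pv_equiv track=rewrite | github.com/tiptreesystems/delphi | prompt_learning/prompt_learner.py | _apply_simple_diff
-- ===== SOURCE A (Python) =====
-- def _apply_simple_diff(diff_lines: list, current_prompt: str) -> str:
--     """Apply simple +/- diff lines to the current prompt."""
--     lines = current_prompt.split("\n")
--
--     # Apply removals first
--     for diff_line in diff_lines:
--         if diff_line.startswith("- "):
--             text_to_remove = diff_line[2:].strip()
--             # Remove lines that contain this text
--             lines = [line for line in lines if text_to_remove not in line]
--
--     # Then apply additions
--     for diff_line in diff_lines:
--         if diff_line.startswith("+ "):
--             text_to_add = diff_line[2:]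
--             lines.append(text_to_add)
--
--     return "\n".join(lines)
-- ===== SOURCE B (Python) =====
-- def _apply_simple_diff(diff_lines: list, current_prompt: str) -> str:
--     """Line-major rewrite: decide each prompt line's fate once by scanning the diff
--     ops inline (for/else with early break), instead of rebuilding the whole line
--     list once per '- ' op; additions are extended in one shot at the end."""
--     out = []
--     for line in current_prompt.split("\n"):
--         for d in diff_lines:
--             if d.startswith("- ") and d[2:].strip() in line:
--                 break
--         else:
--             out.append(line)
--     out.extend(d[2:] for d in diff_lines if d.startswith("+ "))
--     return "\n".join(out)
-- ===== Notes on version B (the rewrite author's own statement) =====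
-- stated objective: alternative
-- what changed: B interchanges the loops: instead of A's pass per '- ' op that rebuilds the whole line list, B makes one pass over the prompt lines and decides each line's fate by scanning the diff ops inline with an early break (for/else), then extends the kept lines with the '+ ' texts in one shot.
import Mathlib
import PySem

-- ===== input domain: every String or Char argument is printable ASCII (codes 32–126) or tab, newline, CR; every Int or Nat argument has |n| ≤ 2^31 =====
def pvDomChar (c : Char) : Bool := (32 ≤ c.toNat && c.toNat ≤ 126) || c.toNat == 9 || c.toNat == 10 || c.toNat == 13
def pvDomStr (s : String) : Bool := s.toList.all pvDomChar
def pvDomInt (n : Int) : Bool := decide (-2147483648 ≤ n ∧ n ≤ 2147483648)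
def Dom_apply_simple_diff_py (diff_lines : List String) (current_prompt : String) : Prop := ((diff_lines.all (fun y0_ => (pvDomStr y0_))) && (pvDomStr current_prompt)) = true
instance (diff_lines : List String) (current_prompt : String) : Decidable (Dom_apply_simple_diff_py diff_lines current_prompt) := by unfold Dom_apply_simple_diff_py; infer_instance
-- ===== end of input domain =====

-- B interchanges the loops: each prompt line's fate is decided once by scanning the diff ops
-- inline (with early break), instead of A's rebuilding of the whole line list per '- ' op
-- (objective: alternative; same asymptotic cost).

-- ===== PORT A =====
def apply_simple_diff_py (diff_lines : List String) (current_prompt : String) : String :=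
  let lines := (PySem.Str.split? current_prompt "\n").getD []
  -- Apply removals first
  let lines := diff_lines.foldl (fun lines diff_line =>
    if PySem.Str.startswith diff_line "- " then
      let text_to_remove := PySem.Str.strip (PySem.Str.slice diff_line (some 2) none)
      lines.filter (fun line => !(PySem.Str.isIn text_to_remove line))
    else lines) lines
  -- Then apply additions
  let lines := diff_lines.foldl (fun lines diff_line =>
    if PySem.Str.startswith diff_line "+ " then
      lines ++ [PySem.Str.slice diff_line (some 2) none]
    else lines) lines
  PySem.Str.join "\n" lines

-- ===== PORT B =====
/-- B's inner for/break loop: scan `diff_lines`, stop (true) at the first '- ' op whose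
stripped text occurs in `line`; falling off the end (for/else) gives false. -/
def pvHitsRemoval : List String → String → Bool
  | [], _ => false
  | d :: ds, line =>
    if PySem.Str.startswith d "- " &&
        PySem.Str.isIn (PySem.Str.strip (PySem.Str.slice d (some 2) none)) line then true
    else pvHitsRemoval ds line

def apply_simple_diff_py_alt (diff_lines : List String) (current_prompt : String) : String :=
  let out := ((PySem.Str.split? current_prompt "\n").getD []).foldl
    (fun out line => if pvHitsRemoval diff_lines line then out else out ++ [line]) []
  let out := out ++ (diff_lines.filter (fun d => PySem.Str.startswith d "+ ")).map
      (fun d => PySem.Str.slice d (some 2) none)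
  PySem.Str.join "\n" out

-- ===== PRECONDITION & SPEC =====
def Spec_apply_simple_diff_py (diff_lines : List String) (current_prompt : String) (out : String) : Prop := out = apply_simple_diff_py_alt diff_lines current_prompt
instance (diff_lines : List String) (current_prompt : String) (out : String) : Decidable (Spec_apply_simple_diff_py diff_lines current_prompt out) := by unfold Spec_apply_simple_diff_py; infer_instance

-- ===== CLAIM (what is proved, stated in full; the proofs are below) =====
def Claim_equal_apply_simple_diff_py : Prop := ∀ (diff_lines : List String) (current_prompt : String), Dom_apply_simple_diff_py diff_lines current_prompt → Spec_apply_simple_diff_py diff_lines current_prompt (apply_simple_diff_py diff_lines current_prompt)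

-- ===== LEMMAS AND PROOFS =====

/-- The stripped texts of the '- ' lines, in order. -/
def pvRems : List String → List String
  | [] => []
  | d :: ds =>
    if PySem.Str.startswith d "- " then
      PySem.Str.strip (PySem.Str.slice d (some 2) none) :: pvRems ds
    else pvRems ds

theorem foldA_removals (ds : List String) (lines : List String) :
    ds.foldl (fun lines diff_line =>
      if PySem.Str.startswith diff_line "- " then
        lines.filter (fun line => !(PySem.Str.isIn (PySem.Str.strip (PySem.Str.slice diff_line (some 2) none)) line))
      else lines) lines
    = lines.filter (fun line => !((pvRems ds).any (fun r => PySem.Str.isIn r line))) := by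
  induction ds generalizing lines with
  | nil => simp [pvRems]
  | cons d ds ih =>
    simp only [List.foldl_cons, pvRems]
    by_cases h : PySem.Str.startswith d "- " = true
    · simp only [h, if_true, ih, List.filter_filter]
      congr 1
      funext line
      simp only [List.any_cons]
      cases PySem.Str.isIn (PySem.Str.strip (PySem.Str.slice d (some 2) none)) line <;>
        cases (pvRems ds).any (fun r => PySem.Str.isIn r line) <;> rfl
    · rw [if_neg h, if_neg h, ih]

theorem foldA_additions (ds : List String) (lines : List String) :
    ds.foldl (fun lines diff_line =>
      if PySem.Str.startswith diff_line "+ " then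
        lines ++ [PySem.Str.slice diff_line (some 2) none]
      else lines) lines
    = lines ++ (ds.filter (fun d => PySem.Str.startswith d "+ ")).map
        (fun d => PySem.Str.slice d (some 2) none) := by
  induction ds generalizing lines with
  | nil => simp
  | cons d ds ih =>
    simp only [List.foldl_cons]
    by_cases h : PySem.Str.startswith d "+ " = true
    · have h' : PySem.Chars.startswith d.toList ['+', ' '] = true := by
        simpa [PySem.Str.startswith] using h
      rw [if_pos h, ih]
      simp [h']
    · have h' : PySem.Chars.startswith d.toList ['+', ' '] = false := by
        simpa [PySem.Str.startswith] using h
      rw [if_neg h, ih]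
      simp [h']

/-- The break-scan agrees with 'some removal text occurs in the line'. -/
theorem pvHitsRemoval_eq_any (ds : List String) (line : String) :
    pvHitsRemoval ds line = (pvRems ds).any (fun r => PySem.Str.isIn r line) := by
  induction ds with
  | nil => simp [pvHitsRemoval, pvRems]
  | cons d ds ih =>
    simp only [pvHitsRemoval, pvRems]
    by_cases h : PySem.Str.startswith d "- " = true
    · simp only [h, if_true, Bool.true_and, List.any_cons, ih]
      cases PySem.Str.isIn (PySem.Str.strip (PySem.Str.slice d (some 2) none)) line <;> simp
    · have h' : PySem.Chars.startswith d.toList ['-', ' '] = false := by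
        simpa [PySem.Str.startswith] using h
      simp [PySem.Str.startswith, h', ih]

theorem foldB_keep (ds : List String) (lines : List String) (acc : List String) :
    lines.foldl (fun out line => if pvHitsRemoval ds line then out else out ++ [line]) acc
    = acc ++ lines.filter (fun line => !(pvHitsRemoval ds line)) := by
  induction lines generalizing acc with
  | nil => simp
  | cons l ls ih =>
    simp only [List.foldl_cons, List.filter_cons]
    cases h : pvHitsRemoval ds l <;> simp [ih]

-- ===== VERDICT (by name: the statement is the Claim_ definition above) =====
theorem apply_simple_diff_py_spec : Claim_equal_apply_simple_diff_py := by
  intro diff_lines current_prompt _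
  show apply_simple_diff_py diff_lines current_prompt = apply_simple_diff_py_alt diff_lines current_prompt
  unfold apply_simple_diff_py apply_simple_diff_py_alt
  simp only [foldB_keep]
  simp only [foldA_removals, foldA_additions, pvHitsRemoval_eq_any, List.nil_append]
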